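-- pv_equiv track=rewrite | github.com/lishuangshuang0616/zUMIs_dev | stitcher.py | get_insertions_locs
-- ===== SOURCE A (Python) =====
-- def get_insertions_locs(cigtuples):
--     insertion_locs = []
--     l = 0
--     for c in cigtuples:
--         if c[0] == 0:
--             l += c[1]
--         elif c[0] == 1:
--             insertion_locs.extend(range(l, l + c[1]))
--             l += c[1]
--     return insertion_locs
-- ===== SOURCE B (Python) =====
-- def get_insertions_locs(cigtuples):
--     # Pass 1: table of each tuple's start offset (exclusive prefix sum of advances).
--     starts = [0] * len(cigtuples)
--     t = 0
--     for i, c in enumerate(cigtuples):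
--         starts[i] = t
--         if c[0] == 0 or c[0] == 1:
--             t += c[1]
--     # Pass 2: flatten the insertion ranges read off the table.
--     return [x for i, c in enumerate(cigtuples) if c[0] == 1
--             for x in range(starts[i], starts[i] + c[1])]
-- ===== Notes on version B (the rewrite author's own statement) =====
-- stated objective: alternative
-- what changed: Replaces A's single loop with an inline running accumulator by a two-pass scheme: first build an exclusive prefix-sum table of per-tuple advances, then flatten the insertion ranges read off that table in a separate comprehension.
import Mathlib
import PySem

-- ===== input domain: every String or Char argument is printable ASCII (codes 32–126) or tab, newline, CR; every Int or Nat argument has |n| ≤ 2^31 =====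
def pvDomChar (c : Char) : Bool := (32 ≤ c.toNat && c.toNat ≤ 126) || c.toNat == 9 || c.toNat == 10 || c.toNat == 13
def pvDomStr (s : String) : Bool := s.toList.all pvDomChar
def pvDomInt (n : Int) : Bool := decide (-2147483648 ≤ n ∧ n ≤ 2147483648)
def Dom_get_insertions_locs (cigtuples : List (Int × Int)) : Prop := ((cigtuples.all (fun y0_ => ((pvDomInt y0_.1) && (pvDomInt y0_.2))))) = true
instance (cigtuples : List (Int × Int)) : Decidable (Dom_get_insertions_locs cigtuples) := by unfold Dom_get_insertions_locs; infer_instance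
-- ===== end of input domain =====

-- B replaces A's inline running accumulator by a prefix-offset table built in a first
-- pass and consumed by a separate flattening pass (objective: alternative decomposition).

-- ===== PORT A =====
-- single loop, running offset l, extending the result at op == 1
def get_insertions_locs (cigtuples : List (Int × Int)) : List Int :=
  (cigtuples.foldl (fun (st : List Int × Int) c =>
      if c.1 == 0 then (st.1, st.2 + c.2)
      else if c.1 == 1 then (st.1 ++ PySem.List.pyRange st.2 (st.2 + c.2) 1, st.2 + c.2)
      else st) ([], 0)).1

-- ===== PORT B =====
-- pass 1: exclusive prefix-sum table of advances; pass 2: flatten insertion ranges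
def get_insertions_locs_alt (cigtuples : List (Int × Int)) : List Int :=
  let starts := (cigtuples.foldl (fun (st : List Int × Int) c =>
      (st.1 ++ [st.2], if c.1 == 0 || c.1 == 1 then st.2 + c.2 else st.2)) ([], 0)).1
  (cigtuples.zip starts).flatMap (fun cs =>
      if cs.1.1 == 1 then PySem.List.pyRange cs.2 (cs.2 + cs.1.2) 1 else [])

-- ===== PRECONDITION & SPEC =====
def Spec_get_insertions_locs (cigtuples : List (Int × Int)) (out : List Int) : Prop := out = get_insertions_locs_alt cigtuples
instance (cigtuples : List (Int × Int)) (out : List Int) : Decidable (Spec_get_insertions_locs cigtuples out) := by unfold Spec_get_insertions_locs; infer_instance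

-- ===== CLAIM (what is proved, stated in full; the proofs are below) =====
def Claim_equal_get_insertions_locs : Prop := ∀ (cigtuples : List (Int × Int)), Dom_get_insertions_locs cigtuples → Spec_get_insertions_locs cigtuples (get_insertions_locs cigtuples)

-- ===== LEMMAS AND PROOFS =====

-- common recursive characterisation: emitted insertions starting at offset l
def pvEmit (l : Int) : List (Int × Int) → List Int
  | [] => []
  | c :: rest =>
    (if c.1 == 1 then PySem.List.pyRange l (l + c.2) 1 else []) ++
      pvEmit (l + (if c.1 == 0 || c.1 == 1 then c.2 else 0)) rest

-- recursive characterisation of B's prefix-offset table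
def pvStarts (t : Int) : List (Int × Int) → List Int
  | [] => []
  | c :: rest => t :: pvStarts (t + (if c.1 == 0 || c.1 == 1 then c.2 else 0)) rest

theorem pvA_fold (xs : List (Int × Int)) (acc : List Int) (l : Int) :
    (xs.foldl (fun (st : List Int × Int) c =>
      if c.1 == 0 then (st.1, st.2 + c.2)
      else if c.1 == 1 then (st.1 ++ PySem.List.pyRange st.2 (st.2 + c.2) 1, st.2 + c.2)
      else st) (acc, l)).1 = acc ++ pvEmit l xs := by
  induction xs generalizing acc l with
  | nil => simp [pvEmit]
  | cons c rest ih =>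
    rw [List.foldl_cons]
    by_cases h0 : c.1 == 0
    · rw [if_pos h0, ih]
      simp [pvEmit, eq_of_beq h0]
    · by_cases h1 : c.1 == 1
      · rw [if_neg h0, if_pos h1, ih]
        simp [pvEmit, eq_of_beq h1]
      · rw [if_neg h0, if_neg h1, ih]
        simp [pvEmit, h0, h1]

theorem pvB_fold (xs : List (Int × Int)) (acc : List Int) (t : Int) :
    (xs.foldl (fun (st : List Int × Int) c =>
      (st.1 ++ [st.2], if c.1 == 0 || c.1 == 1 then st.2 + c.2 else st.2)) (acc, t)).1
    = acc ++ pvStarts t xs := by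
  induction xs generalizing acc t with
  | nil => simp [pvStarts]
  | cons c rest ih =>
    rw [List.foldl_cons, ih]
    by_cases h : (c.1 == 0 || c.1 == 1) = true <;> simp [pvStarts, h]

theorem pvB_flatten (xs : List (Int × Int)) (t : Int) :
    (xs.zip (pvStarts t xs)).flatMap (fun cs =>
      if cs.1.1 == 1 then PySem.List.pyRange cs.2 (cs.2 + cs.1.2) 1 else [])
    = pvEmit t xs := by
  induction xs generalizing t with
  | nil => simp [pvEmit]
  | cons c rest ih =>
    simp only [pvStarts, List.zip_cons_cons, List.flatMap_cons, ih, pvEmit]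

-- ===== VERDICT (by name: the statement is the Claim_ definition above) =====
theorem get_insertions_locs_spec : Claim_equal_get_insertions_locs := by
  intro cigtuples _
  unfold Spec_get_insertions_locs get_insertions_locs get_insertions_locs_alt
  rw [pvA_fold, pvB_fold, List.nil_append, List.nil_append, pvB_flatten]
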